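-- pv_equiv track=rewrite | github.com/ninja-garden/LP | LPL/semantic_syntax.py | CollocationsInfo
-- ===== SOURCE A (Python) =====
-- def CollocationType(collocation):
--     return 'N'
--
-- def find_the_main_word(collocation):
--     if CollocationType(collocation) == 'N':
--         if 'N' in collocation:
--             return collocation.index('N') + 1
--         else:
--             return None
--
-- def CollocationsInfo(collocations):
--     collocations_info = [[1,len(collocations[0])]]
--     for encoding in collocations[1:]:
--         collocations_info.append([collocations_info[-1][0]+collocations_info[-1][1],len(encoding)])
--     for i in range(len(collocations)):
--         collocations_info[i].append(CollocationType(collocations[i]))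
--         collocations_info[i].append(find_the_main_word(collocations[i]))
--     return [tuple(info) for info in collocations_info]
-- ===== SOURCE B (Python) =====
-- def CollocationsInfo(collocations):
--     def main_word(c):
--         return next((i + 1 for i, w in enumerate(c) if w == 'N'), None)
--
--     def go(offset, cs):
--         if not cs:
--             return []
--         head = cs[0]
--         return [(offset, len(head), 'N', main_word(head))] + go(offset + len(head), cs[1:])
--
--     return go(1, collocations)
-- ===== Notes on version B (the rewrite author's own statement) =====
-- stated objective: alternative
-- what changed: Structural recursion on the list carrying the offset, emitting each complete 4-tuple directly and finding the main word with a first-match generator over enumerate, instead of A's staged mutation: build offset/length pairs via infos[-1], a second indexed loop appending type and 'in'+index main word, then a tuple-conversion comprehension.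
import Mathlib
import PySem

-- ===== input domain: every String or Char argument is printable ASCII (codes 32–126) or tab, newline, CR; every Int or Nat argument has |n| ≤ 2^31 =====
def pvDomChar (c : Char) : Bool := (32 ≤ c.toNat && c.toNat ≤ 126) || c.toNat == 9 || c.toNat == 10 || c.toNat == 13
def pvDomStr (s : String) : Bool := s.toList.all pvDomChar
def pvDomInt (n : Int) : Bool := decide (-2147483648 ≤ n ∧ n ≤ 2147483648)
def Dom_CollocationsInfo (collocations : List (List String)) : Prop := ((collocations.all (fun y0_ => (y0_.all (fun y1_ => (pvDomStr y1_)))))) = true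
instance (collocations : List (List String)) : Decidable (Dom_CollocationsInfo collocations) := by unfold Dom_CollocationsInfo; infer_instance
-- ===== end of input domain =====

-- B replaces A's staged mutation (offset/length pairs via infos[-1], a second indexed
-- loop appending type and main word, then a tuple comprehension) by structural recursion
-- carrying the offset and a first-match scan over enumerate; same return values on
-- nonempty input (objective: alternative).

-- ===== PORT A =====
def CollocationType (collocation : List String) : String := "N"

def findTheMainWord (collocation : List String) : Option Int :=
  if CollocationType collocation == "N" then
    if collocation.contains "N" then
      (PySem.List.index? collocation "N").map (fun k => (k : Int) + 1)
    else none
  else none  -- Python falls off the function: returns None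

def CollocationsInfo (collocations : List (List String)) : List (Int × Int × String × Option Int) :=
  match collocations with
  | [] => []  -- Python raises IndexError on collocations[0] here; excluded by Pre_
  | c0 :: rest =>
    -- first loop: collocations_info starts [[1, len(collocations[0])]], each step appends
    -- [infos[-1][0] + infos[-1][1], len(encoding)]
    let infos : List (Int × Int) :=
      rest.foldl
        (fun l c =>
          let last := (PySem.List.pyGet? l (-1)).getD (0, 0)  -- list is never empty; default unreachable
          l ++ [(last.1 + last.2, (c.length : Int))])
        [(1, (c0.length : Int))]
    -- second loop (i in range(len(collocations))): append type and main word to infos[i];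
    -- final comprehension turns each 4-element list into a tuple
    List.zipWith (fun (p : Int × Int) c => (p.1, p.2, CollocationType c, findTheMainWord c))
      infos (c0 :: rest)

-- ===== PORT B =====
-- next((i + 1 for i, w in enumerate(c) if w == 'N'), None)
def pvMainWord (c : List String) : Option Int :=
  ((PySem.List.enumerate c).find? (fun p => p.2 == "N")).map (fun p => p.1 + 1)

-- recursive helper go(offset, cs)
def pvGo (offset : Int) : List (List String) → List (Int × Int × String × Option Int)
  | [] => []
  | head :: t =>
      (offset, (head.length : Int), "N", pvMainWord head) :: pvGo (offset + head.length) t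

def CollocationsInfo_alt (collocations : List (List String)) : List (Int × Int × String × Option Int) :=
  pvGo 1 collocations

-- ===== PRECONDITION & SPEC =====
-- A raises IndexError on the empty list (collocations[0]); excluded here.
def Pre_CollocationsInfo (collocations : List (List String)) : Prop := collocations ≠ []
instance (collocations : List (List String)) : Decidable (Pre_CollocationsInfo collocations) := by unfold Pre_CollocationsInfo; infer_instance
def pvWitness_CollocationsInfo : List (List String) := [["a", "N"], ["x"]]

def Spec_CollocationsInfo (collocations : List (List String)) (out : List (Int × Int × String × Option Int)) : Prop := out = CollocationsInfo_alt collocations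
instance (collocations : List (List String)) (out : List (Int × Int × String × Option Int)) : Decidable (Spec_CollocationsInfo collocations out) := by unfold Spec_CollocationsInfo; infer_instance

-- ===== CLAIM (what is proved, stated in full; the proofs are below) =====
def Claim_equal_CollocationsInfo : Prop := ∀ (collocations : List (List String)), Dom_CollocationsInfo collocations → Pre_CollocationsInfo collocations → Spec_CollocationsInfo collocations (CollocationsInfo collocations)

-- ===== LEMMAS AND PROOFS =====

/-- The offset/length pairs A's first loop produces. -/
def pvOffs : Int → List (List String) → List (Int × Int)
  | _, [] => []
  | o, c :: t => (o, (c.length : Int)) :: pvOffs (o + c.length) t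

theorem pvA_fold (rest : List (List String)) (L : List (Int × Int)) (o s : Int) :
    rest.foldl
      (fun l c =>
        let last := (PySem.List.pyGet? l (-1)).getD (0, 0)
        l ++ [(last.1 + last.2, (c.length : Int))])
      (L ++ [(o, s)]) = L ++ [(o, s)] ++ pvOffs (o + s) rest := by
  induction rest generalizing L o s with
  | nil => simp [pvOffs]
  | cons c t ih =>
    rw [List.foldl_cons,
      show (let last := (PySem.List.pyGet? (L ++ [(o, s)]) (-1)).getD (0, 0)
            L ++ [(o, s)] ++ [(last.1 + last.2, (c.length : Int))])
          = (L ++ [(o, s)]) ++ [(o + s, (c.length : Int))] from by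
        simp [PySem.List.pyGet?_neg_one_append_singleton],
      ih (L ++ [(o, s)]) (o + s) (c.length : Int)]
    simp [pvOffs]

theorem pvMain_shift (c : List String) (s : Int) :
    ((PySem.List.enumerate c s).find? (fun p => p.2 == "N")).map (fun p => p.1 + 1)
      = if c.contains "N" then (PySem.List.index? c "N").map (fun k => (k : Int) + s + 1) else none := by
  induction c generalizing s with
  | nil => simp [PySem.List.enumerate_nil]
  | cons x t ih =>
    rw [PySem.List.enumerate_cons]
    by_cases hx : x = "N"
    · subst hx
      simp [List.idxOf?_cons]
    · rw [List.find?_cons_of_neg (by simp [hx]), ih (s + 1),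
        PySem.List.index?_cons_of_ne t hx]
      have hco : ("N" == x) = false := by simp [Ne.symm hx]
      simp only [List.contains_cons, hco, Bool.false_or]
      by_cases hc : t.contains "N"
      · rw [if_pos hc, if_pos hc]
        rcases PySem.List.index? t "N" with _ | k
        · rfl
        · simp
          ring
      · rw [if_neg hc, if_neg hc]

theorem pvMain_eq (c : List String) : findTheMainWord c = pvMainWord c := by
  unfold findTheMainWord pvMainWord CollocationType
  rw [pvMain_shift c 0]
  simp

theorem pvA_zip (cs : List (List String)) (o : Int) :
    List.zipWith (fun (p : Int × Int) c => (p.1, p.2, CollocationType c, findTheMainWord c))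
      (pvOffs o cs) cs = pvGo o cs := by
  induction cs generalizing o with
  | nil => rfl
  | cons c t ih =>
    simp only [pvOffs, pvGo]
    rw [List.zipWith_cons_cons, ih]
    simp [CollocationType, pvMain_eq]

-- ===== VERDICT (by name: the statement is the Claim_ definition above) =====
theorem CollocationsInfo_spec : Claim_equal_CollocationsInfo := by
  intro cs _ hpre
  unfold Spec_CollocationsInfo CollocationsInfo CollocationsInfo_alt
  cases cs with
  | nil => exact absurd rfl hpre
  | cons c0 rest =>
    have h := pvA_fold rest [] 1 (c0.length : Int)
    simp only [List.nil_append] at h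
    simp only [h]
    have : ([(1, (c0.length : Int))] ++ pvOffs (1 + c0.length) rest) = pvOffs 1 (c0 :: rest) := by
      simp [pvOffs]
    rw [this, pvA_zip]
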